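-- pv_equiv track=rewrite | github.com/kentontilford/hfsrb-final | scripts/fill_hsa_hpa_from_hospital_csv.py | choose_majority
-- ===== SOURCE A (Python) =====
-- from collections import Counter, defaultdict
--
-- def choose_majority(counts: dict[str, Counter]) -> dict[str, str]:
--     out: dict[str, str] = {}
--     for county, ctr in counts.items():
--         if not ctr:
--             continue
--         # pick highest count; tie-break by lexical
--         items = sorted(ctr.items(), key=lambda kv: (-kv[1], kv[0]))
--         out[county] = items[0][0]
--     return out
-- ===== SOURCE B (Python) =====
-- def choose_majority(counts):
--     out = {}
--     for county, ctr in counts.items():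
--         best = None  # (key, count) of the current winner
--         for k, v in ctr.items():
--             if best is None or v > best[1] or (v == best[1] and k < best[0]):
--                 best = (k, v)
--         if best is not None:
--             out[county] = best[0]
--     return out
-- ===== Notes on version B (the rewrite author's own statement) =====
-- stated objective: alternative
-- what changed: Replaced A's per-county composite-key sort (sorted by (-count, key), take the head) with a single streaming argmax pass that keeps one (key, count) champion and updates it only on a strict improvement (higher count, or equal count with lexically smaller key); the empty-counter guard disappears because an empty scan simply yields no champion.
import Mathlib
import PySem

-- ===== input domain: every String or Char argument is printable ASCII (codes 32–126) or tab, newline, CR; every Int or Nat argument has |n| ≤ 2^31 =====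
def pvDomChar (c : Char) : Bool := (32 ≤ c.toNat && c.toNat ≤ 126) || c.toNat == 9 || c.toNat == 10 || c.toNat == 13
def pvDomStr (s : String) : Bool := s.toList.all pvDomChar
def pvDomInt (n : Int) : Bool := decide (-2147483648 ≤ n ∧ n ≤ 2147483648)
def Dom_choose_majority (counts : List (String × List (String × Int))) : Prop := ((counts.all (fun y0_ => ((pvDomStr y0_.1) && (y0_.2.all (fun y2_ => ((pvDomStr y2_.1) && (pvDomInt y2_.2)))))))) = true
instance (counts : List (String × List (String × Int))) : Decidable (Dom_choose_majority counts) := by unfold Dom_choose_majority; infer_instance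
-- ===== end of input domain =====

-- B replaces A's per-county composite-key sort-and-take-head by a single streaming argmax pass
-- keeping one (key, count) champion updated on strict improvement; same return value everywhere.

-- ===== PORT A =====
def choose_majority (counts : List (String × List (String × Int))) : List (String × String) :=
  (counts.foldl
    (fun out ckv =>
      if ckv.2 = [] then out
      else
        -- items = sorted(ctr.items(), key=lambda kv: (-kv[1], kv[0])); out[county] = items[0][0]
        match (PySem.List.sorted2 ckv.2 (fun kv => -kv.2) (fun kv => kv.1)).head? with
        | some kv0 => PySem.Dict.insert out ckv.1 kv0.1
        | none => out)   -- unreachable guard for items[0]: the sorted list of a nonempty ctr is nonempty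
    (PySem.Dict.empty : PySem.Dict String String)).items

-- ===== PORT B =====
-- inner loop of Source B: stream ctr.items(), keeping the current champion (key, count)
def pvChampion : Option (String × Int) → List (String × Int) → Option (String × Int)
  | best, [] => best
  | best, kv :: rest =>
      pvChampion
        (match best with
         | none => some kv
         | some b => if b.2 < kv.2 ∨ (kv.2 = b.2 ∧ kv.1 < b.1) then some kv else some b)
        rest

-- outer loop of Source B, written as structural recursion over counts
def pvChooseAux : PySem.Dict String String → List (String × List (String × Int)) → PySem.Dict String String
  | out, [] => out
  | out, (county, ctr) :: rest =>
      pvChooseAux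
        (match pvChampion none ctr with
         | some b => PySem.Dict.insert out county b.1
         | none => out)      -- best is None: empty counter, county skipped
        rest

def choose_majority_alt (counts : List (String × List (String × Int))) : List (String × String) :=
  (pvChooseAux PySem.Dict.empty counts).items

-- ===== PRECONDITION & SPEC =====
def Spec_choose_majority (counts : List (String × List (String × Int))) (out : List (String × String)) : Prop := out = choose_majority_alt counts
instance (counts : List (String × List (String × Int))) (out : List (String × String)) : Decidable (Spec_choose_majority counts out) := by unfold Spec_choose_majority; infer_instance

-- ===== CLAIM (what is proved, stated in full; the proofs are below) =====
def Claim_equal_choose_majority : Prop := ∀ (counts : List (String × List (String × Int))), Dom_choose_majority counts → Spec_choose_majority counts (choose_majority counts)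

-- ===== LEMMAS AND PROOFS =====

-- 'x comes strictly before m' under A's sort key (-count, key)
def pvBetter (x m : String × Int) : Bool :=
  decide ((-x.2 : Int) < -m.2) || (!decide ((-m.2 : Int) < -x.2) && decide (x.1 < m.1))

def pvLexStep (o : Option (String × Int)) (x : String × Int) : Option (String × Int) :=
  match o with
  | none => some x
  | some m => if pvBetter x m then some x else some m

theorem head?_insertBy {α : Type} (before : α → α → Bool) (x : α) (acc : List α) :
    (PySem.List.insertBy before x acc).head? =
      some (match acc.head? with
            | none => x
            | some y => if before x y then x else y) := by
  cases acc with
  | nil => rfl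
  | cons y ys =>
    simp only [PySem.List.insertBy, List.head?_cons]
    split <;> simp_all

theorem head?_foldl_insertBy {α : Type} (before : α → α → Bool) (xs : List α) (acc : List α) :
    (xs.foldl (fun a x => PySem.List.insertBy before x a) acc).head? =
      xs.foldl (fun o x =>
        match o with
        | none => some x
        | some m => if before x m then some x else some m) acc.head? := by
  induction xs generalizing acc with
  | nil => rfl
  | cons x t ih =>
    simp only [List.foldl_cons]
    rw [ih, head?_insertBy]
    cases acc with
    | nil => rfl
    | cons y ys =>
      simp only [List.head?_cons]
      split <;> rfl

theorem head?_sorted2 (xs : List (String × Int)) :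
    (PySem.List.sorted2 xs (fun kv => -kv.2) (fun kv => kv.1)).head? =
      xs.foldl pvLexStep none := by
  simp only [PySem.List.sorted2, if_neg (by decide : ¬ (false = true))]
  rw [head?_foldl_insertBy]
  simp only [List.head?_nil]
  apply PySem.List.foldl_congr_mem
  intro o x _
  cases o <;> simp [pvLexStep, pvBetter]

-- B's streaming champion computes the same running fold as A's sort-head characterisation
theorem pvChampion_eq_foldl (xs : List (String × Int)) :
    ∀ o : Option (String × Int), pvChampion o xs = xs.foldl pvLexStep o := by
  induction xs with
  | nil => intro o; rfl
  | cons x t ih =>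
    intro o
    simp only [pvChampion, List.foldl_cons, ih]
    congr 1
    cases o with
    | none => rfl
    | some m =>
      simp only [pvLexStep]
      have : (m.2 < x.2 ∨ (x.2 = m.2 ∧ x.1 < m.1)) ↔ pvBetter x m = true := by
        rw [pvBetter]
        simp only [Bool.or_eq_true, Bool.and_eq_true, Bool.not_eq_true',
          decide_eq_true_eq, decide_eq_false_iff_not, neg_lt_neg_iff]
        constructor
        · rintro (h | ⟨h1, h2⟩)
          · exact Or.inl h
          · exact Or.inr ⟨by omega, h2⟩
        · rintro (h | ⟨h1, h2⟩)
          · exact Or.inl h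
          · by_cases hlt : m.2 < x.2
            · exact Or.inl hlt
            · exact Or.inr ⟨by omega, h2⟩
      by_cases h : m.2 < x.2 ∨ (x.2 = m.2 ∧ x.1 < m.1)
      · rw [if_pos h, if_pos (this.mp h)]
      · rw [if_neg h, if_neg (fun hb => h (this.mpr hb))]

-- B's outer recursion is the fold A performs, once A's sort-head is rewritten to the running fold
theorem pvChooseAux_eq_foldl (counts : List (String × List (String × Int))) :
    ∀ out : PySem.Dict String String,
      pvChooseAux out counts =
        counts.foldl
          (fun out ckv =>
            match ckv.2.foldl pvLexStep none with
            | some b => PySem.Dict.insert out ckv.1 b.1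
            | none => out) out := by
  induction counts with
  | nil => intro out; rfl
  | cons c rest ih =>
    intro out
    obtain ⟨county, ctr⟩ := c
    simp only [pvChooseAux, List.foldl_cons, ih, pvChampion_eq_foldl]

-- ===== VERDICT (by name: the statement is the Claim_ definition above) =====
theorem choose_majority_spec : Claim_equal_choose_majority := by
  intro counts _
  unfold Spec_choose_majority choose_majority choose_majority_alt
  rw [pvChooseAux_eq_foldl]
  congr 1
  apply PySem.List.foldl_congr_mem
  intro out ckv _
  by_cases hc : ckv.2 = []
  · simp [hc]
  · rw [if_neg hc, head?_sorted2]
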